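-- pv_equiv track=rewrite | github.com/jtsimmons108/advent2021_python | day18/day18.py | explode_left
-- ===== SOURCE A (Python) =====
-- def explode_left(left, num):
--     i = len(left) - 1
--     reg = True
--     while i >= 0:
--         if left[i].isdigit():
--             begin = left.rindex('[', 0, i)
--             alt = left.rfind(',',0, i)
--             if alt > begin:
--                 begin = alt
--             n = int(left[begin+1:i+1])
--             n += num
--             return left[:begin+1] + str(n) + left[i+1:]
--         i -= 1
--     return left
-- ===== SOURCE B (Python) =====
-- def explode_left(left, num):
--     # One forward tokenizing pass: record the span of every maximal -?digits
--     # token; the last span recorded is the rightmost number.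
--     last = None
--     i = 0
--     n = len(left)
--     while i < n:
--         c = left[i]
--         if c.isdigit() or (c == '-' and i + 1 < n and left[i + 1].isdigit()):
--             j = i + 1
--             while j < n and left[j].isdigit():
--                 j += 1
--             last = (i, j)
--             i = j
--         else:
--             i += 1
--     if last is None:
--         return left
--     s, e = last
--     return left[:s] + str(int(left[s:e]) + num) + left[e:]
-- ===== Notes on version B (the rewrite author's own statement) =====
-- stated objective: idiomatic
-- what changed: B replaces A's backward scan for the rightmost digit plus rindex/rfind backward delimiter searches and a slice re-parse by one forward tokenizing pass that records the span of every maximal -?digits token and rewrites the last recorded span.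
-- outside the precondition, e.g. on explode_left('[ 5]', 1): A returns '[6]', B returns '[ 6]'; on explode_left('[+5]', 1): A returns '[6]', B returns '[+6]'; on explode_left('[1_2]', 1): A returns '[13]', B returns '[1_3]'
import Mathlib
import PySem

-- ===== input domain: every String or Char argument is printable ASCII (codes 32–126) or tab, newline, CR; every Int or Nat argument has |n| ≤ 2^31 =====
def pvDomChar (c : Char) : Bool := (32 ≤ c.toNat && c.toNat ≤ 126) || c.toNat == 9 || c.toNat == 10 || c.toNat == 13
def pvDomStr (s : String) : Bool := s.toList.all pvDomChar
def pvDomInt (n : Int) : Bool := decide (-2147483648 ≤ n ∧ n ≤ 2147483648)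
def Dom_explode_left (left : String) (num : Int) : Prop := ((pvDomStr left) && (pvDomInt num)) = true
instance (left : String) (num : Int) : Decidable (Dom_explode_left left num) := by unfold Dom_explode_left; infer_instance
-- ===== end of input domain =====

-- B rewrites the last number of the string with one forward tokenizing pass instead of
-- A's backward digit scan followed by backward rindex/rfind delimiter searches (idiomatic).

-- ===== PORT A =====
-- s.rfind(c, 0, i) / s.rindex('[', 0, i) for a ONE-CHARACTER needle and bounds 0 ≤ i ≤ len(s):
-- the highest j < i with s[j] = c (ported by hand, exact on that domain; rindex's ValueError
-- = the `none` case, excluded by Pre_).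
def rlast (c : Char) (cs : List Char) : Nat → Option Nat
  | 0 => none
  | j + 1 => if cs.getD j ' ' = c then some j else rlast c cs j

-- the `while i >= 0` loop of A; argument `i` here is Python's i+1, so 0 = loop exhausted.
-- `some s` = a `return` inside the loop; `none` = fell off the loop end.
def aLoop (cs : List Char) (num : Int) : Nat → Option String
  | 0 => none
  | i + 1 =>
    if PySem.Chars.isdigit (cs.getD i ' ') then
      match rlast '[' cs i with
      | none => some (String.ofList cs)      -- Python: ValueError from rindex; excluded by Pre_
      | some b0 =>
        let b : Nat := match rlast ',' cs i with
          | some a => if b0 < a then a else b0   -- `if alt > begin: begin = alt` (alt = -1 when none)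
          | none => b0
        -- int(left[begin+1 : i+1]); slice exact as drop/take since 0 ≤ b+1 ≤ i+1 ≤ len
        match PySem.Int.ofChars? ((cs.drop (b + 1)).take (i + 1 - (b + 1))) with
        | none => some (String.ofList cs)    -- Python: ValueError from int(); excluded by Pre_
        | some n => some (String.ofList (cs.take (b + 1) ++ PySem.Int.toChars (n + num) ++ cs.drop (i + 1)))
    else aLoop cs num i

def explode_left (left : String) (num : Int) : String :=
  (aLoop left.toList num left.toList.length).getD left

-- ===== PORT B =====
-- length of the maximal digit run at the head (B's inner `while j < n and left[j].isdigit()`)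
def digitRun (l : List Char) : Nat := (l.takeWhile PySem.Chars.isdigit).length

-- B's outer while loop, as recursion on the remaining suffix; `i` is the index of the
-- suffix head in the full string, `last` the last token span recorded so far.
def scanTok : List Char → Nat → Option (Nat × Nat) → Option (Nat × Nat)
  | [], _, last => last
  | c :: rest, i, last =>
    if PySem.Chars.isdigit c then
      scanTok (rest.drop (digitRun rest)) (i + 1 + digitRun rest) (some (i, i + 1 + digitRun rest))
    else if c = '-' && (match rest with | d :: _ => PySem.Chars.isdigit d | [] => false) then
      scanTok (rest.drop (digitRun rest)) (i + 1 + digitRun rest) (some (i, i + 1 + digitRun rest))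
    else scanTok rest (i + 1) last
  termination_by l => l.length
  decreasing_by
    all_goals simp [List.length_drop]

def explode_left_alt (left : String) (num : Int) : String :=
  let cs := left.toList
  match scanTok cs 0 none with
  | none => left
  | some (s, e) =>
    -- int(left[s:e]); the token matches -?digits so this parse cannot fail
    match PySem.Int.ofChars? ((cs.drop s).take (e - s)) with
    | none => left
    | some v => String.ofList (cs.take s ++ PySem.Int.toChars (v + num) ++ cs.drop e)

-- ===== PRECONDITION & SPEC =====
def isDelim (c : Char) : Bool := c = '[' || c = ','

-- `-?digits`: an optional leading minus followed by a nonempty run of digits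
def canonTok (s : List Char) : Bool :=
  match s with
  | '-' :: rest => rest ≠ [] && rest.all PySem.Chars.isdigit
  | _ => s ≠ [] && s.all PySem.Chars.isdigit

-- Pre_ (bounded quantifiers over indices, written as range.any/all so it computes):
-- either the string has no digit, or there are i (the last digit position) and b < i
-- (the last '['/',' before i) such that the segment between them is a plain -?digits
-- token and some '[' occurs at or before b.
-- Pre_ excludes (a) inputs where A raises ValueError (a digit with no '[' anywhere before it,
-- or a segment int() cannot parse) and (b) inputs whose segment between the last delimiter and
-- the rightmost digit is accepted by int() but is not a plain -?digits token (spaces, '+',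
-- underscores): there A's reslice-and-reparse and B's tokenizer are two defensible readings.
def Pre_explode_left (left : String) (num : Int) : Prop :=
  ((left.toList.all fun c => !PySem.Chars.isdigit c) ||
   ((List.range left.toList.length).any fun i =>
      PySem.Chars.isdigit (left.toList.getD i ' ') &&
      ((List.range left.toList.length).all fun j =>
          decide (j ≤ i) || !PySem.Chars.isdigit (left.toList.getD j ' ')) &&
      ((List.range i).any fun b =>
         isDelim (left.toList.getD b ' ') &&
         ((List.range i).all fun j => decide (j ≤ b) || !isDelim (left.toList.getD j ' ')) &&
         canonTok ((left.toList.drop (b + 1)).take (i - b)) &&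
         (left.toList.getD b ' ' == '[' ||
          (List.range b).any fun k => left.toList.getD k ' ' == '[')))) = true

instance (left : String) (num : Int) : Decidable (Pre_explode_left left num) := by
  unfold Pre_explode_left; infer_instance

def pvWitness_explode_left : String × Int := ("[[1,2],[3,4]]", 5)

def Spec_explode_left (left : String) (num : Int) (out : String) : Prop := out = explode_left_alt left num
instance (left : String) (num : Int) (out : String) : Decidable (Spec_explode_left left num out) := by unfold Spec_explode_left; infer_instance

-- ===== CLAIM (what is proved, stated in full; the proofs are below) =====
def Claim_equal_explode_left : Prop := ∀ (left : String) (num : Int), Dom_explode_left left num → Pre_explode_left left num → Spec_explode_left left num (explode_left left num)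

-- ===== LEMMAS AND PROOFS =====

theorem explode_left_witness_ok :
    Dom_explode_left pvWitness_explode_left.1 pvWitness_explode_left.2 ∧
    Pre_explode_left pvWitness_explode_left.1 pvWitness_explode_left.2 := by decide

-- ---- facts about rlast ----

theorem rlast_spec (c : Char) (cs : List Char) :
    ∀ m r, rlast c cs m = some r → r < m ∧ cs.getD r ' ' = c := by
  intro m
  induction m with
  | zero => intro r h; simp [rlast] at h
  | succ j ih =>
    intro r h
    rw [rlast] at h
    by_cases hc : cs.getD j ' ' = c
    · rw [if_pos hc] at h
      cases h
      exact ⟨Nat.lt_succ_self _, hc⟩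
    · rw [if_neg hc] at h
      rcases ih r h with ⟨h1, h2⟩
      exact ⟨by omega, h2⟩

theorem rlast_skip (c : Char) (cs : List Char) :
    ∀ m i, i ≤ m → (∀ j, i ≤ j → j < m → cs.getD j ' ' ≠ c) →
      rlast c cs m = rlast c cs i := by
  intro m
  induction m with
  | zero => intro i hi _; interval_cases i; rfl
  | succ mm ih =>
    intro i hi hno
    rcases Nat.eq_or_lt_of_le hi with rfl | hlt
    · rfl
    · have hne : cs.getD mm ' ' ≠ c := hno mm (by omega) (by omega)
      have : rlast c cs (mm + 1) = rlast c cs mm := by rw [rlast, if_neg hne]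
      rw [this]
      exact ih i (by omega) (fun j h1 h2 => hno j h1 (by omega))

theorem rlast_hit (c : Char) (cs : List Char) (m : Nat) (h : cs.getD m ' ' = c) :
    rlast c cs (m + 1) = some m := by rw [rlast, if_pos h]

theorem rlast_none (c : Char) (cs : List Char) :
    ∀ m, rlast c cs m = none → ∀ k, k < m → cs.getD k ' ' ≠ c := by
  intro m
  induction m with
  | zero => intro _ k hk; omega
  | succ mm ih =>
    intro h k hk
    rw [rlast] at h
    by_cases hc : cs.getD mm ' ' = c
    · rw [if_pos hc] at h; cases h
    · rw [if_neg hc] at h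
      rcases Nat.lt_succ_iff_lt_or_eq.mp hk with h' | rfl
      · exact ih h k h'
      · exact hc

-- ---- the A loop skips non-digit positions ----

theorem aLoop_skip (cs : List Char) (num : Int) :
    ∀ m i, i ≤ m → (∀ j, i ≤ j → j < m → PySem.Chars.isdigit (cs.getD j ' ') = false) →
      aLoop cs num m = aLoop cs num i := by
  intro m
  induction m with
  | zero => intro i hi _; interval_cases i; rfl
  | succ mm ih =>
    intro i hi hno
    rcases Nat.eq_or_lt_of_le hi with rfl | hlt
    · rfl
    · have hnd : PySem.Chars.isdigit (cs.getD mm ' ') = false := hno mm (by omega) (by omega)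
      have : aLoop cs num (mm + 1) = aLoop cs num mm := by
        rw [aLoop]
        simp only [hnd, Bool.false_eq_true, if_false]
      rw [this]
      exact ih i (by omega) (fun j h1 h2 => hno j h1 (by omega))

-- ---- facts about the B scanner ----

theorem scanTok_nodigit (l : List Char) (h : ∀ c ∈ l, PySem.Chars.isdigit c = false) :
    ∀ i last, scanTok l i last = last := by
  induction l with
  | nil => intro i last; rw [scanTok.eq_def]
  | cons c rest ih =>
    intro i last
    have hc : PySem.Chars.isdigit c = false := h c (List.mem_cons_self ..)
    have hrest : ∀ x ∈ rest, PySem.Chars.isdigit x = false :=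
      fun x hx => h x (List.mem_cons_of_mem _ hx)
    rw [scanTok.eq_def]
    cases rest with
    | nil =>
      simp only [hc, Bool.and_false, Bool.false_eq_true, if_false]
      rw [scanTok.eq_def]
    | cons d r =>
      have hd : PySem.Chars.isdigit d = false := hrest d (List.mem_cons_self ..)
      simp only [hc, hd, Bool.and_false, Bool.false_eq_true, if_false]
      exact ih hrest (i + 1) last

theorem takeWhile_all_append {p : Char → Bool} (D R : List Char) (h : ∀ c ∈ D, p c = true) :
    (D ++ R).takeWhile p = D ++ R.takeWhile p := by
  induction D with
  | nil => simp
  | cons d D' ih =>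
    simp only [List.cons_append, List.takeWhile_cons, h d (List.mem_cons_self ..), if_true]
    simp only [ih (fun c hc => h c (List.mem_cons_of_mem _ hc))]

theorem takeWhile_nodigit (T : List Char) (h : ∀ c ∈ T, PySem.Chars.isdigit c = false) :
    T.takeWhile PySem.Chars.isdigit = [] := by
  cases T with
  | nil => rfl
  | cons t T' => simp [h t (List.mem_cons_self ..)]

theorem takeWhile_stop (P' : List Char) (d : Char) (R : List Char)
    (hd : PySem.Chars.isdigit d = false) :
    ((P' ++ d :: R).takeWhile PySem.Chars.isdigit) = P'.takeWhile PySem.Chars.isdigit := by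
  induction P' with
  | nil => simp [hd]
  | cons p P'' ih =>
    by_cases hp : PySem.Chars.isdigit p = true
    · simp [hp, ih]
    · simp only [Bool.not_eq_true] at hp
      simp [hp]

theorem canonTok_elim (S : List Char) (h : canonTok S = true) :
    (∃ D, S = '-' :: D ∧ D ≠ [] ∧ ∀ c ∈ D, PySem.Chars.isdigit c = true) ∨
    (S ≠ [] ∧ ∀ c ∈ S, PySem.Chars.isdigit c = true) := by
  unfold canonTok at h
  split at h
  · next D =>
    simp only [Bool.and_eq_true, ne_eq, decide_not, Bool.not_eq_eq_eq_not, Bool.not_true,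
      decide_eq_false_iff_not, List.all_eq_true] at h
    exact Or.inl ⟨D, rfl, h.1, h.2⟩
  · next =>
    simp only [Bool.and_eq_true, ne_eq, decide_not, Bool.not_eq_eq_eq_not, Bool.not_true,
      decide_eq_false_iff_not, List.all_eq_true] at h
    exact Or.inr h

theorem digitRun_token (D T : List Char) (hD : ∀ c ∈ D, PySem.Chars.isdigit c = true)
    (hT : ∀ c ∈ T, PySem.Chars.isdigit c = false) :
    digitRun (D ++ T) = D.length := by
  unfold digitRun
  rw [takeWhile_all_append D T hD, takeWhile_nodigit T hT]
  simp

-- scanning from the start of a -?digits token with nothing but digit-free text after it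
theorem scanTok_base (S T : List Char) (hS : canonTok S = true)
    (hT : ∀ c ∈ T, PySem.Chars.isdigit c = false) :
    ∀ i last, scanTok (S ++ T) i last = some (i, i + S.length) := by
  intro i last
  rcases canonTok_elim S hS with ⟨D, rfl, hDne, hDall⟩ | ⟨hne, hall⟩
  · cases D with
    | nil => exact absurd rfl hDne
    | cons e D' =>
      rw [List.cons_append, scanTok.eq_def]
      have h1 : PySem.Chars.isdigit '-' = false := by decide
      have h2 : PySem.Chars.isdigit e = true := hDall e (List.mem_cons_self ..)
      simp only [h1, Bool.false_eq_true, if_false, List.cons_append, h2, decide_true,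
        Bool.and_true]
      have hrun : digitRun (e :: (D' ++ T)) = D'.length + 1 := by
        have h3 := digitRun_token (e :: D') T hDall hT
        rw [List.cons_append] at h3
        simpa using h3
      rw [hrun, List.drop_succ_cons, List.drop_left, scanTok_nodigit T hT]
      simp only [if_true, true_and, Option.some.injEq, Prod.mk.injEq, List.length_cons]
      omega
  · cases S with
    | nil => exact absurd rfl hne
    | cons s0 S' =>
      rw [List.cons_append, scanTok.eq_def]
      have h2 : PySem.Chars.isdigit s0 = true := hall s0 (List.mem_cons_self ..)
      simp only [h2, if_true]
      have hrun : digitRun (S' ++ T) = S'.length :=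
        digitRun_token _ _ (fun c hc => hall c (List.mem_cons_of_mem _ hc)) hT
      rw [hrun, List.drop_left, scanTok_nodigit T hT]
      simp only [true_and, Option.some.injEq, Prod.mk.injEq, List.length_cons]
      omega

-- the central B lemma: scanning P ++ d :: S ++ T, with d a delimiter, S a -?digits token and
-- T digit-free, records exactly the span of S last.
theorem scanTok_main (d : Char) (S T : List Char)
    (hd : isDelim d = true) (hS : canonTok S = true)
    (hT : ∀ c ∈ T, PySem.Chars.isdigit c = false) :
    ∀ P i0 last, scanTok (P ++ d :: (S ++ T)) i0 last =
      some (i0 + P.length + 1, i0 + P.length + 1 + S.length) := by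
  have hdd : d = '[' ∨ d = ',' := by
    unfold isDelim at hd
    rcases Bool.or_eq_true_iff.mp hd with h | h <;>
      [exact Or.inl (by simpa using h); exact Or.inr (by simpa using h)]
  have hd' : PySem.Chars.isdigit d = false := by rcases hdd with rfl | rfl <;> decide
  have hdm : decide (d = '-') = false := by rcases hdd with rfl | rfl <;> decide
  suffices H : ∀ n P, P.length ≤ n → ∀ i0 last,
      scanTok (P ++ d :: (S ++ T)) i0 last =
        some (i0 + P.length + 1, i0 + P.length + 1 + S.length) by
    exact fun P => H P.length P le_rfl
  intro n
  induction n with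
  | zero =>
    intro P hP i0 last
    have : P = [] := List.eq_nil_of_length_eq_zero (by omega)
    subst this
    rw [List.nil_append, scanTok.eq_def]
    simp only [hd', Bool.false_eq_true, if_false, hdm, Bool.false_and]
    rw [scanTok_base S T hS hT]
    simp
  | succ n ih =>
    intro P hP i0 last
    cases P with
    | nil =>
      rw [List.nil_append, scanTok.eq_def]
      simp only [hd', Bool.false_eq_true, if_false, hdm, Bool.false_and]
      rw [scanTok_base S T hS hT]
      simp
    | cons p P' =>
      rw [List.cons_append, scanTok.eq_def]
      by_cases hp : PySem.Chars.isdigit p = true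
      · simp only [hp, if_true]
        have hrun : digitRun (P' ++ d :: (S ++ T)) = (P'.takeWhile PySem.Chars.isdigit).length := by
          unfold digitRun; rw [takeWhile_stop P' d _ hd']
        have hkle : (P'.takeWhile PySem.Chars.isdigit).length ≤ P'.length :=
          (P'.takeWhile_sublist PySem.Chars.isdigit).length_le
        rw [hrun, List.drop_append_of_le_length hkle,
          ih (P'.drop (P'.takeWhile PySem.Chars.isdigit).length)
            (by simp only [List.length_drop]; simp only [List.length_cons] at hP; omega)]
        simp only [Option.some.injEq, Prod.mk.injEq, List.length_drop, List.length_cons]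
        omega
      · simp only [hp, Bool.false_eq_true, if_false]
        cases P' with
        | nil =>
          simp only [List.nil_append, hd', Bool.and_false, Bool.false_eq_true, if_false]
          rw [scanTok.eq_def]
          simp only [hd', Bool.false_eq_true, if_false, hdm, Bool.false_and]
          rw [scanTok_base S T hS hT]
          simp
        | cons q Q =>
          by_cases hq : PySem.Chars.isdigit q = true
          · simp only [List.cons_append, hq, Bool.and_true]
            by_cases hpm : p = '-'
            · simp only [hpm, decide_true, if_true]
              have hrun : digitRun ((q :: Q) ++ d :: (S ++ T)) =
                  ((q :: Q).takeWhile PySem.Chars.isdigit).length := by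
                unfold digitRun; rw [takeWhile_stop (q :: Q) d _ hd']
              have hkle : ((q :: Q).takeWhile PySem.Chars.isdigit).length ≤ (q :: Q).length :=
                ((q :: Q).takeWhile_sublist PySem.Chars.isdigit).length_le
              rw [← List.cons_append, hrun, List.drop_append_of_le_length hkle,
                ih ((q :: Q).drop ((q :: Q).takeWhile PySem.Chars.isdigit).length)
                  (by simp only [List.length_drop]; simp only [List.length_cons] at hP hkle ⊢; omega)]
              simp only [Option.some.injEq, Prod.mk.injEq, List.length_drop, List.length_cons]
              simp only [List.length_cons] at hkle
              omega
            · simp only [decide_eq_false hpm, Bool.false_eq_true, if_false]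
              rw [← List.cons_append, ih (q :: Q) (by simp only [List.length_cons] at hP ⊢; omega)]
              simp only [Option.some.injEq, Prod.mk.injEq, List.length_cons]
              omega
          · simp only [List.cons_append, hq, Bool.and_false, Bool.false_eq_true, if_false]
            rw [← List.cons_append, ih (q :: Q) (by simp only [List.length_cons] at hP ⊢; omega)]
            simp only [Option.some.injEq, Prod.mk.injEq, List.length_cons]
            omega

-- index-level corollaries used to connect Pre_'s bounded quantifiers to the lemmas above

theorem getD_eq_elem (cs : List Char) (j : Nat) (h : j < cs.length) :
    cs.getD j ' ' = cs[j] := List.getD_eq_getElem cs ' ' h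

theorem drop_nodigit (cs : List Char) (i : Nat)
    (h : ∀ j, j < cs.length → i < j → PySem.Chars.isdigit (cs.getD j ' ') = false) :
    ∀ c ∈ cs.drop (i + 1), PySem.Chars.isdigit c = false := by
  intro c hc
  rcases List.mem_iff_getElem.mp hc with ⟨m, hm, rfl⟩
  rw [List.getElem_drop]
  have hlt : i + 1 + m < cs.length := by
    simp only [List.length_drop] at hm; omega
  have := h (i + 1 + m) hlt (by omega)
  rwa [getD_eq_elem cs _ hlt] at this

-- the decomposition of cs at the delimiter b and last digit i
theorem split_at (cs : List Char) (b i : Nat) (hb : b < i) (hi : i < cs.length) :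
    cs = cs.take b ++ cs.getD b ' ' ::
      ((cs.drop (b + 1)).take (i - b) ++ cs.drop (i + 1)) := by
  have h1 : cs = cs.take b ++ cs.drop b := (List.take_append_drop b cs).symm
  have h2 : cs.drop b = cs.getD b ' ' :: cs.drop (b + 1) := by
    rw [getD_eq_elem cs b (by omega)]
    exact List.drop_eq_getElem_cons (by omega)
  have h3 : cs.drop (b + 1) =
      (cs.drop (b + 1)).take (i - b) ++ cs.drop (i + 1) := by
    have := (List.take_append_drop (i - b) (cs.drop (b + 1))).symm
    rw [List.drop_drop] at this
    have harith : b + 1 + (i - b) = i + 1 := by omega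
    rwa [harith] at this
  calc cs = cs.take b ++ cs.drop b := h1
    _ = cs.take b ++ cs.getD b ' ' :: cs.drop (b + 1) := by rw [← h2]
    _ = _ := by rw [← h3]

-- ===== VERDICT (by name: the statement is the Claim_ definition above) =====
theorem explode_left_spec : Claim_equal_explode_left := by
  unfold Claim_equal_explode_left
  intro left num _ hpre
  simp only [Spec_explode_left, explode_left, explode_left_alt]
  unfold Pre_explode_left at hpre
  simp only [Bool.or_eq_true, List.all_eq_true, List.any_eq_true, List.mem_range,
    Bool.and_eq_true, Bool.not_eq_true', decide_eq_true_eq, beq_iff_eq] at hpre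
  set cs := left.toList with hcs
  rcases hpre with hno | ⟨i, hi, ⟨hdig, hafter⟩, b, hb, ⟨⟨hdel, hmax⟩, hcanon⟩, hbr⟩
  · -- no digit anywhere: A's loop falls through, B's scan records nothing
    have hnoidx : ∀ j, 0 ≤ j → j < cs.length → PySem.Chars.isdigit (cs.getD j ' ') = false := by
      intro j _ hj
      rw [getD_eq_elem cs j hj]
      exact hno _ (List.getElem_mem hj)
    rw [aLoop_skip cs num cs.length 0 (Nat.zero_le _) hnoidx]
    rw [scanTok_nodigit cs hno 0 none]
    rfl
  · -- i = last digit, b = last delimiter before it, canonical segment between them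
    have hafter' : ∀ j, j < cs.length → i < j → PySem.Chars.isdigit (cs.getD j ' ') = false := by
      intro j h1 h2
      rcases hafter j h1 with h | h
      · omega
      · exact h
    have hmax' : ∀ j, j < i → b < j → isDelim (cs.getD j ' ') = false := by
      intro j h1 h2
      rcases hmax j h1 with h | h
      · omega
      · exact h
    have hdel2 : cs.getD b ' ' = '[' ∨ cs.getD b ' ' = ',' := by
      unfold isDelim at hdel
      rcases Bool.or_eq_true_iff.mp hdel with h | h
      · exact Or.inl (by simpa using h)
      · exact Or.inr (by simpa using h)
    -- B side: the scanner records exactly (b+1, i+1) last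
    have hT : ∀ c ∈ cs.drop (i + 1), PySem.Chars.isdigit c = false := drop_nodigit cs i hafter'
    have hsplit := split_at cs b i hb hi
    have hBtok : scanTok cs 0 none = some (b + 1, i + 1) := by
      conv_lhs => rw [hsplit]
      rw [scanTok_main (cs.getD b ' ') ((cs.drop (b + 1)).take (i - b)) (cs.drop (i + 1))
        hdel hcanon hT (cs.take b) 0 none]
      have hlen1 : (cs.take b).length = b := by
        rw [List.length_take]; omega
      have hlen2 : ((cs.drop (b + 1)).take (i - b)).length = i - b := by
        rw [List.length_take, List.length_drop]; omega
      rw [hlen1, hlen2]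
      simp only [Option.some.injEq, Prod.mk.injEq]
      omega
    -- A side: the loop stops at i and both backward searches produce b
    have hskipA : aLoop cs num cs.length = aLoop cs num (i + 1) :=
      aLoop_skip cs num cs.length (i + 1) (by omega) (fun j h1 h2 => hafter' j h2 (by omega))
    have hnotL : ∀ j, b + 1 ≤ j → j < i → cs.getD j ' ' ≠ '[' := by
      intro j h1 h2 he
      have := hmax' j h2 (by omega)
      rw [he] at this
      simp [isDelim] at this
    have hnotC : ∀ j, b + 1 ≤ j → j < i → cs.getD j ' ' ≠ ',' := by
      intro j h1 h2 he
      have := hmax' j h2 (by omega)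
      rw [he] at this
      simp [isDelim] at this
    have hskipL : rlast '[' cs i = rlast '[' cs (b + 1) :=
      rlast_skip '[' cs i (b + 1) (by omega) hnotL
    have hskipC : rlast ',' cs i = rlast ',' cs (b + 1) :=
      rlast_skip ',' cs i (b + 1) (by omega) hnotC
    have hA : aLoop cs num (i + 1) =
        some (match PySem.Int.ofChars? ((cs.drop (b + 1)).take (i + 1 - (b + 1))) with
          | none => String.ofList cs
          | some n => String.ofList (cs.take (b + 1) ++ PySem.Int.toChars (n + num) ++ cs.drop (i + 1))) := by
      rw [aLoop]
      have hdig2 : PySem.Chars.isdigit (cs[i]?.getD ' ') = true := by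
        simpa only [List.getD] using hdig
      rcases hdel2 with hdb | hdb
      · -- the delimiter itself is '[': rindex finds b, rfind stays below it
        have hL : rlast '[' cs i = some b := by
          rw [hskipL]; exact rlast_hit '[' cs b hdb
        have hC : rlast ',' cs i = rlast ',' cs b := by
          rw [hskipC, rlast, if_neg (by rw [hdb]; decide)]
        cases hc : rlast ',' cs b with
        | none =>
          simp [hdig2, hL, hC, hc]
          cases PySem.Int.ofChars? (List.take (i - b) (List.drop (b + 1) cs)) <;> rfl
        | some a =>
          have ha := (rlast_spec ',' cs b a hc).1
          simp [hdig2, hL, hC, hc, if_neg (by omega : ¬ b < a)]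
          cases PySem.Int.ofChars? (List.take (i - b) (List.drop (b + 1) cs)) <;> rfl
      · -- the delimiter is ',': rfind finds b, rindex finds an earlier '['
        have hbr2 : ∃ k, k < b ∧ cs.getD k ' ' = '[' := by
          rcases hbr with h | h
          · rw [hdb] at h; exact absurd h (by decide)
          · exact h
        rcases hbr2 with ⟨k, hk, hkb⟩
        have hC : rlast ',' cs i = some b := by
          rw [hskipC]; exact rlast_hit ',' cs b hdb
        have hL : rlast '[' cs i = rlast '[' cs b := by
          rw [hskipL, rlast, if_neg (by rw [hdb]; decide)]
        cases hL0 : rlast '[' cs b with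
        | none => exact absurd hkb (rlast_none '[' cs b hL0 k hk)
        | some b0 =>
          have hb0 := (rlast_spec '[' cs b b0 hL0).1
          simp [hdig2, hL, hL0, hC, if_pos (by omega : b0 < b)]
          cases PySem.Int.ofChars? (List.take (i - b) (List.drop (b + 1) cs)) <;> rfl
    -- assemble: both sides reduce to the same match on the same parsed segment
    rw [hskipA, hA, hBtok]
    show (match PySem.Int.ofChars? (List.take (i + 1 - (b + 1)) (List.drop (b + 1) cs)) with
          | none => String.ofList cs
          | some n => String.ofList (List.take (b + 1) cs ++ PySem.Int.toChars (n + num) ++ List.drop (i + 1) cs)) =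
        (match PySem.Int.ofChars? (List.take (i + 1 - (b + 1)) (List.drop (b + 1) cs)) with
          | none => left
          | some v => String.ofList (List.take (b + 1) cs ++ PySem.Int.toChars (v + num) ++ List.drop (i + 1) cs))
    cases hv : PySem.Int.ofChars? (List.take (i + 1 - (b + 1)) (List.drop (b + 1) cs)) with
    | none => exact String.ofList_toList (s := left)
    | some v => rfl
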